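-- pv_equiv track=rewrite | github.com/newball2814/IOT | uart.py | checkIntegrity
-- ===== SOURCE A (Python) =====
-- def checkIntegrity(string):
--     receivedList = string.split(":")
--
--     if(len(receivedList) < 6):
--         return 1
--     receivedSum = int(receivedList[len(receivedList)-1])
--     calcSum = 0
--     numofDelimiter = 0
--
--     for i in range(len(string)):
--         if string[i] == ':':
--             numofDelimiter+=1
--         if numofDelimiter == 5:
--             break
--         calcSum += ord(string[i])
--
--     if calcSum != receivedSum:
--         return 0
--     else:
--         return 1
-- ===== SOURCE B (Python) =====
-- def checkIntegrity(string):
--     fields = string.split(":")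
--     if len(fields) < 6:
--         return 1
--     prefix = ":".join(fields[:5])
--     return 1 if sum(map(ord, prefix)) == int(fields[-1]) else 0
-- ===== Notes on version B (the rewrite author's own statement) =====
-- stated objective: simpler
-- what changed: B replaces A's indexed character scan with a delimiter counter and break by joining the first five split fields back with the colon separator and summing the ords of that prefix; Pre_ excludes inputs with at least 6 colon-separated fields whose last field is not int-parseable, where both A and B raise ValueError alike.
import Mathlib
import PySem

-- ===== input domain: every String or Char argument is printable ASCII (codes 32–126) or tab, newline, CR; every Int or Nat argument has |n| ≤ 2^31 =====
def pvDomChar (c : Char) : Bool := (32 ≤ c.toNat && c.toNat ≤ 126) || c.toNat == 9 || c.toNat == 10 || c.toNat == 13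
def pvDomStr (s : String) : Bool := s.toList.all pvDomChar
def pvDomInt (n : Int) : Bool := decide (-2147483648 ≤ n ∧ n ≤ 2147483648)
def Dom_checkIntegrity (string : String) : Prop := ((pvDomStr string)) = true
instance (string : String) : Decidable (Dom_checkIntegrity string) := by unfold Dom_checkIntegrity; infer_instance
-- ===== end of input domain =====

-- B verifies the checksum on the split-field structure (':'.join of the first five
-- fields) instead of A's indexed character scan with a delimiter counter and break;
-- objective: simpler.

-- ===== PORT A =====
-- A's for-loop over the characters: counts delimiters, breaks at the 5th colon,
-- otherwise adds ord(c) to calcSum.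
def checkIntegrityLoop : List Char → Int → Nat → Int
  | [], calcSum, _ => calcSum
  | c :: rest, calcSum, numofDelimiter =>
    let numofDelimiter := if c = ':' then numofDelimiter + 1 else numofDelimiter
    if numofDelimiter = 5 then calcSum
    else checkIntegrityLoop rest (calcSum + (c.toNat : Int)) numofDelimiter

def checkIntegrity (string : String) : Int :=
  let receivedList := PySem.Chars.splitOn string.toList [':']
  if receivedList.length < 6 then 1
  else
    match PySem.Int.ofChars?
        ((PySem.List.pyGet? receivedList ((receivedList.length : Int) - 1)).getD []) with
    | none => 0  -- int() raises ValueError in Python; these inputs are outside Pre_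
    | some receivedSum =>
      let calcSum := checkIntegrityLoop string.toList 0 0
      if calcSum ≠ receivedSum then 0 else 1

-- ===== PORT B =====
def sumOrds (cs : List Char) : Int := (cs.map (fun c => (c.toNat : Int))).sum

def checkIntegrity_alt (string : String) : Int :=
  let fields := PySem.Chars.splitOn string.toList [':']
  if fields.length < 6 then 1
  else
    let pfx := PySem.Chars.join [':'] (fields.take 5)
    match PySem.Int.ofChars? ((PySem.List.pyGet? fields (-1)).getD []) with
    | none => 0  -- int() raises ValueError in Python; these inputs are outside Pre_
    | some receivedSum =>
      if sumOrds pfx = receivedSum then 1 else 0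

-- ===== PRECONDITION & SPEC =====
-- Pre_ excludes exactly the inputs where Python's int(receivedList[-1]) raises
-- ValueError (≥ 6 colon-separated fields whose last field is not int-parseable).
def Pre_checkIntegrity (string : String) : Prop :=
  (PySem.Chars.splitOn string.toList [':']).length < 6 ∨
    (PySem.Int.ofChars?
      ((PySem.Chars.splitOn string.toList [':']).getLast?.getD [])).isSome = true
instance (string : String) : Decidable (Pre_checkIntegrity string) := by
  unfold Pre_checkIntegrity; infer_instance

def pvWitness_checkIntegrity : String := "a:b:c:d:e:12"

def Spec_checkIntegrity (string : String) (out : Int) : Prop := out = checkIntegrity_alt string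
instance (string : String) (out : Int) : Decidable (Spec_checkIntegrity string out) := by
  unfold Spec_checkIntegrity; infer_instance

-- ===== CLAIM (what is proved, stated in full; the proofs are below) =====
def Claim_equal_checkIntegrity : Prop := ∀ (string : String), Dom_checkIntegrity string → Pre_checkIntegrity string → Spec_checkIntegrity string (checkIntegrity string)

-- ===== LEMMAS AND PROOFS =====

theorem modifyHead_id' (l : List (List Char)) : List.modifyHead (fun x => x) l = l := by
  cases l <;> simp

theorem intercalate_singleton' (a : List Char) : List.intercalate [':'] [a] = a := by
  simp [List.intercalate]

theorem intercalate_cons₂ (a b : List Char) (t : List (List Char)) :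
    List.intercalate [':'] (a :: b :: t) = a ++ ':' :: List.intercalate [':'] (b :: t) := by
  simp [List.intercalate]

-- PySem's splitOn with a one-character separator is Mathlib's List.splitOn.
theorem splitOn_go_eq (d : Char) (l : List Char) :
    ∀ (fuel : Nat) (cur : List Char) (acc : List (List Char)), l.length ≤ fuel →
      PySem.Chars.splitOn.go [d] fuel l cur acc =
        acc.reverse ++ (l.splitOnP (· == d)).modifyHead (cur.reverse ++ ·) := by
  induction l with
  | nil =>
    intro fuel cur acc _
    cases fuel <;> simp [PySem.Chars.splitOn.go, List.splitOnP_nil]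
  | cons c rest ih =>
    intro fuel cur acc hf
    cases fuel with
    | zero => simp at hf
    | succ f =>
      rw [List.splitOnP_cons]
      by_cases hc : c = d
      · subst hc
        have : [c].isPrefixOf (c :: rest) = true := by simp [List.isPrefixOf]
        simp only [PySem.Chars.splitOn.go, this, if_true, List.length_cons,
          List.length_nil, List.drop_succ_cons, List.drop_zero]
        rw [ih f [] (cur.reverse :: acc) (by simpa using Nat.le_of_succ_le_succ hf)]
        simp [modifyHead_id']
      · have hpre : [d].isPrefixOf (c :: rest) = false := by
          simp [List.isPrefixOf]; exact fun h => (hc h.symm).elim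
        simp only [PySem.Chars.splitOn.go, hpre]
        rw [if_neg (by simp)]
        rw [ih f (c :: cur) acc (Nat.le_of_succ_le_succ hf)]
        have hbeq : (c == d) = false := by simp [hc]
        simp only [hbeq, Bool.false_eq_true, if_false]
        rw [List.modifyHead_modifyHead]
        congr 1
        congr 1
        funext x
        simp

theorem splitOn_eq (d : Char) (cs : List Char) :
    PySem.Chars.splitOn cs [d] = cs.splitOn d := by
  unfold PySem.Chars.splitOn List.splitOn
  rw [splitOn_go_eq d cs (cs.length + 1) [] [] (by omega)]
  simp [modifyHead_id']

-- the characters of cs strictly before its k-th colon (all of cs if fewer colons)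
def upto : Nat → List Char → List Char
  | _, [] => []
  | k, c :: r => if c = ':' then (if k = 1 then [] else ':' :: upto (k - 1) r)
                 else c :: upto k r

theorem loop_eq_upto (cs : List Char) :
    ∀ (acc : Int) (nd : Nat), nd < 5 →
      checkIntegrityLoop cs acc nd = acc + sumOrds (upto (5 - nd) cs) := by
  induction cs with
  | nil => intro acc nd _; simp [checkIntegrityLoop, upto, sumOrds]
  | cons c rest ih =>
    intro acc nd hnd
    by_cases hc : c = ':'
    · subst hc
      by_cases h4 : nd = 4
      · subst h4
        simp [checkIntegrityLoop, upto, sumOrds]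
      · have hupto : upto (5 - nd) (':' :: rest) = ':' :: upto (5 - nd - 1) rest := by
          simp [upto, show ¬(5 - nd = 1) from by omega]
        have hloop : checkIntegrityLoop (':' :: rest) acc nd
            = checkIntegrityLoop rest (acc + ((':' : Char).toNat : Int)) (nd + 1) := by
          simp [checkIntegrityLoop, show ¬(nd + 1 = 5) from by omega]
        rw [hloop, hupto, ih _ (nd + 1) (by omega),
          show 5 - (nd + 1) = 5 - nd - 1 from by omega]
        simp [sumOrds]; ring
    · have hupto : upto (5 - nd) (c :: rest) = c :: upto (5 - nd) rest := by
        simp [upto, hc]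
      have hloop : checkIntegrityLoop (c :: rest) acc nd
          = checkIntegrityLoop rest (acc + (c.toNat : Int)) nd := by
        simp [checkIntegrityLoop, hc, show ¬(nd = 5) from by omega]
      rw [hloop, hupto, ih _ nd hnd]
      simp [sumOrds]; ring

theorem intercalate_take_eq_upto (cs : List Char) :
    ∀ (k : Nat), 1 ≤ k →
      List.intercalate [':'] ((cs.splitOn ':').take k) = upto k cs := by
  induction cs with
  | nil =>
    intro k hk
    obtain ⟨m, rfl⟩ : ∃ m, k = m + 1 := ⟨k - 1, by omega⟩
    simp [List.splitOn, List.splitOnP_nil, upto, intercalate_singleton']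
  | cons c rest ih =>
    intro k hk
    obtain ⟨m, rfl⟩ : ∃ m, k = m + 1 := ⟨k - 1, by omega⟩
    obtain ⟨h, t, hht⟩ := List.exists_cons_of_ne_nil (List.splitOnP_ne_nil (· == ':') rest)
    simp only [List.splitOn, List.splitOnP_cons] at *
    by_cases hc : c = ':'
    · subst hc
      rw [if_pos (by simp)]
      by_cases h1 : m = 0
      · subst h1
        simp [upto, intercalate_singleton']
      · obtain ⟨m', rfl⟩ : ∃ m', m = m' + 1 := ⟨m - 1, by omega⟩
        rw [List.take_succ_cons, hht, List.take_succ_cons, intercalate_cons₂,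
          ← List.take_succ_cons, ← hht, ih (m' + 1) (by omega)]
        simp [upto]
    · rw [if_neg (by simp [hc]), hht]
      simp only [List.modifyHead_cons, List.take_succ_cons]
      have hih := ih (m + 1) (by omega)
      rw [hht, List.take_succ_cons] at hih
      rw [upto, if_neg hc, ← hih]
      cases htm : List.take m t with
      | nil => simp [intercalate_singleton']
      | cons b t' => rw [intercalate_cons₂, intercalate_cons₂]; simp

theorem pyGet_last (xs : List (List Char)) (h : xs ≠ []) :
    PySem.List.pyGet? xs (-1) = PySem.List.pyGet? xs ((xs.length : Int) - 1) := by
  have hl : 0 < xs.length := List.length_pos_of_ne_nil h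
  simp only [PySem.List.pyGet?, PySem.List.pyIdx?]
  rw [if_neg (by omega), if_pos (by omega), if_pos (by omega), if_pos (by omega)]
  congr 2
  omega

-- ===== VERDICT (by name: the statement is the Claim_ definition above) =====
theorem checkIntegrity_spec : Claim_equal_checkIntegrity := by
  intro string _hdom _hpre
  unfold Spec_checkIntegrity checkIntegrity checkIntegrity_alt
  simp only []
  by_cases hlen : (PySem.Chars.splitOn string.toList [':']).length < 6
  · rw [if_pos hlen, if_pos hlen]
  · rw [if_neg hlen, if_neg hlen]
    have hne : PySem.Chars.splitOn string.toList [':'] ≠ [] := by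
      intro h; rw [h] at hlen; simp at hlen
    rw [pyGet_last _ hne]
    cases hm : PySem.Int.ofChars?
        ((PySem.List.pyGet? (PySem.Chars.splitOn string.toList [':'])
          (((PySem.Chars.splitOn string.toList [':']).length : Int) - 1)).getD []) with
    | none => rfl
    | some receivedSum =>
      have hcalc : checkIntegrityLoop string.toList 0 0 =
          sumOrds (PySem.Chars.join [':']
            ((PySem.Chars.splitOn string.toList [':']).take 5)) := by
        rw [loop_eq_upto string.toList 0 0 (by omega)]
        rw [splitOn_eq]
        show (0 : Int) + sumOrds (upto 5 string.toList) =
          sumOrds (List.intercalate [':'] ((string.toList.splitOn ':').take 5))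
        rw [intercalate_take_eq_upto string.toList 5 (by omega)]
        ring
      simp only [hcalc]
      by_cases he : sumOrds (PySem.Chars.join [':']
          ((PySem.Chars.splitOn string.toList [':']).take 5)) = receivedSum
      · simp [he]
      · simp [he]
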